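-- pv_equiv track=rewrite | github.com/TeamLab/lab_for_gachon_cs50 | reverse_before_after_same_number/reverse_before_after_same_number.py | create_even_number_method
-- ===== SOURCE A (Python) =====
-- def create_even_number_method(number):
--     # '''
--     # Input :
--     #   -1이상의 정수형 숫자
--     # Output :
--     #   -숫자의 길이가 짝수인 숫자들중 가운대를 기준으로 뒤집었을 때 똑같은 숫자
--     #   -숫자의 길이가 짝수다. ex) 21, 4856   >> len("21") = 2   len("4856") = 4
--     #   -가운대를 기준으로 뒤집었을 때 똑같은 숫자다. ex) 22, 4224, 5555
--     #    1. 22를 가운대를 기준으로 나눠서(2,2) 한숫자를 뒤집었을때 똑같다.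
--     #    2. 4224 가운대를 기준으로 나눠서(42,24) 한숫자를 뒤집었을때(42,42) 똑같다.
--     #    3. 12344321 가운대를 기준으로 나눠서(1234,4321) 한숫자를 뒤집었을때(1234,1234) 똑같다.
--     #   - 위의 조건을 만족하는 숫자들을 1차원 리스트 형태로 반환
--     # Examples :
--     #   >>>import reverse_before_after_same_number as rbasn
--     #   >>>rbasn.create_even_number_method(9)
--     #   []
--     #   >>>rbasn.create_even_number_method(15)
--     #   [11]
--     #   >>>rbasn.create_even_number_method(100)
--     #   [11, 22, 33, 44, 55, 66, 77, 88, 99]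
--     #   >>>rbasn.create_even_number_method(1001)
--     #   [11, 22, 33, 44, 55, 66, 77, 88, 99, 1001]
--     # '''
--     even_number_list = []
--     for num in range(1,number+1):
--         len_of_number_remain = len(str(num))%2
--         len_of_number_share = len(str(num))//2
--         if len_of_number_remain == 0:
--             count_method = 0
--             for ct in range(0,len_of_number_share):
--                 if str(num)[ct]== str(num)[-1-ct]:
--                     count_method += 1
--                 if count_method == len_of_number_share:
--                     even_number_list.append(num)
--
--     return even_number_list
-- ===== SOURCE B (Python) =====
-- def create_even_number_method(number):
--     # Generate even-length palindromes directly by mirroring each half f,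
--     # instead of testing every number up to `number`.
--     result = []
--     low, high = 1, 10
--     while low * high <= number:
--         for first in range(low, high):
--             rev, t = 0, first
--             while t > 0:
--                 rev, t = rev * 10 + t % 10, t // 10
--             pal = first * high + rev
--             if pal <= number:
--                 result.append(pal)
--         low, high = high, high * 10
--     return result
-- ===== Notes on version B (the rewrite author's own statement) =====
-- stated objective: faster
-- what changed: Instead of scanning every candidate number up to N and testing its decimal string char-by-char for being an even-length palindrome, B constructs each even-length palindrome directly by mirroring the digits of its first half (pal = first*10^h + digit-reversal of first) for every half-width h, emitting them in increasing order.
import Mathlib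
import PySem

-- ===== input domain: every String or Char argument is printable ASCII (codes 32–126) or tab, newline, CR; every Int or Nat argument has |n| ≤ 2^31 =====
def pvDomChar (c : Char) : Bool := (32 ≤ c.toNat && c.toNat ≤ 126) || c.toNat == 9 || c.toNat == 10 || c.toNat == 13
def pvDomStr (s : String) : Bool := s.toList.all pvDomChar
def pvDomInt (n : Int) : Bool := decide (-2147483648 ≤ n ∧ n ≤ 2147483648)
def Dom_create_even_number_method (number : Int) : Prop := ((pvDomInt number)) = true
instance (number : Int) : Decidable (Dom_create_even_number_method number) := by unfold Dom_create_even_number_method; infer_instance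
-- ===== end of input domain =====

-- B enumerates even-length palindromes directly by mirroring each first half
-- instead of A's scan of every number up to N; same return value, measured faster.

-- ===== PORT A =====
def create_even_number_method (number : Int) : List Int :=
  (PySem.List.pyRange 1 (number + 1) 1).foldl (fun even_number_list num =>
    let len_of_number_remain := PySem.Int.mod (PySem.Str.len (PySem.Int.toStr num)) 2
    let len_of_number_share := PySem.Int.floordiv (PySem.Str.len (PySem.Int.toStr num)) 2
    if len_of_number_remain = 0 then
      ((PySem.List.pyRange 0 len_of_number_share 1).foldl (fun (st : Int × List Int) ct =>
        let count_method :=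
          if PySem.Str.pyGet? (PySem.Int.toStr num) ct
              = PySem.Str.pyGet? (PySem.Int.toStr num) (-1 - ct)
          then st.1 + 1 else st.1
        (count_method, if count_method = len_of_number_share then st.2 ++ [num] else st.2))
        (0, even_number_list)).2
    else even_number_list) []

-- ===== PORT B =====
-- the inner `while t > 0` digit-reversal loop of Source B
def pvRevLoop (rev t : Int) : Int :=
  if h : 0 < t then
    pvRevLoop (rev * 10 + PySem.Int.mod t 10) (PySem.Int.floordiv t 10)
  else rev
termination_by t.toNat
decreasing_by
  have h10 : PySem.Int.floordiv t 10 = t / 10 := PySem.Int.floordiv_eq_ediv_of_pos (by norm_num)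
  omega

-- the outer `while low * high <= number` loop of Source B (the two extra positivity
-- conjuncts in the guard only make the recursion total; on the reachable states
-- low = 10^(k-1), high = 10^k they always hold, so the Python guard decides)
def pvOuterLoop (number low high : Int) (result : List Int) : List Int :=
  if h : 0 < low ∧ low < high ∧ low * high ≤ number then
    pvOuterLoop number high (high * 10)
      ((PySem.List.pyRange low high 1).foldl (fun acc first =>
        if first * high + pvRevLoop 0 first ≤ number
        then acc ++ [first * high + pvRevLoop 0 first] else acc) result)
  else result
termination_by (number + 1 - low * high).toNat
decreasing_by
  obtain ⟨h1, h2, h3⟩ := h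
  have hh : 0 < high := lt_trans h1 h2
  have : low * high < high * (high * 10) := by nlinarith
  omega

def create_even_number_method_alt (number : Int) : List Int :=
  pvOuterLoop number 1 10 []

-- ===== PRECONDITION & SPEC =====
def Spec_create_even_number_method (number : Int) (out : List Int) : Prop := out = create_even_number_method_alt number
instance (number : Int) (out : List Int) : Decidable (Spec_create_even_number_method number out) := by unfold Spec_create_even_number_method; infer_instance

-- ===== CLAIM (what is proved, stated in full; the proofs are below) =====
def Claim_equal_create_even_number_method : Prop := ∀ (number : Int), Dom_create_even_number_method number → Spec_create_even_number_method number (create_even_number_method number)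

-- ===== LEMMAS AND PROOFS =====

-- ---- shared digit vocabulary (proof helpers only) ----
def pvRv (f : Nat) : Nat := Nat.ofDigits 10 (Nat.digits 10 f).reverse
def pvMirror (f : Nat) : Nat := f * 10 ^ (Nat.digits 10 f).length + pvRv f
-- "x is an even-length decimal palindrome ≤ number", in mirrored-half form
def pvEP (number x : Int) : Prop :=
  x ≤ number ∧ ∃ h f : Nat, 1 ≤ h ∧ 10 ^ (h - 1) ≤ f ∧ f < 10 ^ h ∧ x = (pvMirror f : Int)

-- A's per-number test, as the port writes it
def pvTest (num : Int) : Prop :=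
  PySem.Int.mod (PySem.Str.len (PySem.Int.toStr num)) 2 = 0 ∧
  ∀ i : Nat, i < (PySem.Int.floordiv (PySem.Str.len (PySem.Int.toStr num)) 2).toNat →
    PySem.Str.pyGet? (PySem.Int.toStr num) (i : Int)
      = PySem.Str.pyGet? (PySem.Int.toStr num) (-1 - (i : Int))

-- Bool form of pvTest (kept as a plain def so no extra instances are needed)
def pvTestB (num : Int) : Bool :=
  decide (PySem.Int.mod (PySem.Str.len (PySem.Int.toStr num)) 2 = 0) &&
  (List.range (PySem.Int.floordiv (PySem.Str.len (PySem.Int.toStr num)) 2).toNat).all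
    (fun i => decide (PySem.Str.pyGet? (PySem.Int.toStr num) (i : Int)
      = PySem.Str.pyGet? (PySem.Int.toStr num) (-1 - (i : Int))))

lemma pvTestB_iff (num : Int) : pvTestB num = true ↔ pvTest num := by
  unfold pvTestB pvTest
  simp [List.all_eq_true, List.mem_range]


-- ---- Section 1: A is a filter ----

lemma pvInner (s : String) (num share0 : Int) (share : Nat) (hcast : share0 = (share : Int))
    (hpos : 0 < share)
    (m : Nat → Prop) [DecidablePred m]
    (hm : ∀ i : Nat, m i ↔ PySem.Str.pyGet? s (i : Int) = PySem.Str.pyGet? s (-1 - (i : Int))) :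
    ∀ (j : Nat) (c : Int) (l : List Int), j ≤ share →
      c = ((List.range j).countP (fun i => decide (m i)) : Int) →
    ((PySem.List.pyRange (j : Int) share0 1).foldl (fun (st : Int × List Int) ct =>
        let count_method :=
          if PySem.Str.pyGet? s ct = PySem.Str.pyGet? s (-1 - ct)
          then st.1 + 1 else st.1
        (count_method, if count_method = share0 then st.2 ++ [num] else st.2))
      (c, l)).2
    = if j < share ∧ (List.range share).countP (fun i => decide (m i)) = share
      then l ++ [num] else l := by
  subst hcast
  have hcle : ∀ k : Nat, (List.range k).countP (fun i => decide (m i)) ≤ k := by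
    intro k
    simpa using List.countP_le_length (l := List.range k) (p := fun i => decide (m i))
  have H : ∀ (n j : Nat) (l : List Int), share - j ≤ n → j ≤ share →
      ((PySem.List.pyRange (j : Int) (share : Int) 1).foldl (fun (st : Int × List Int) ct =>
        let count_method :=
          if PySem.Str.pyGet? s ct = PySem.Str.pyGet? s (-1 - ct)
          then st.1 + 1 else st.1
        (count_method, if count_method = (share : Int) then st.2 ++ [num] else st.2))
        ((((List.range j).countP (fun i => decide (m i)) : Nat) : Int), l)).2
      = if j < share ∧ (List.range share).countP (fun i => decide (m i)) = share
        then l ++ [num] else l := by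
    intro n
    induction n with
    | zero =>
      intro j l h1 h2
      have hje : j = share := by omega
      subst hje
      rw [PySem.List.pyRange_one_eq_nil (by omega)]
      simp
    | succ n ih =>
      intro j l h1 h2
      by_cases hjs : j = share
      · subst hjs
        rw [PySem.List.pyRange_one_eq_nil (by omega)]
        simp
      · have hjlt : j < share := by omega
        rw [PySem.List.pyRange_one_cons (by omega : (j : Int) < (share : Int)), List.foldl_cons]
        dsimp only
        rw [show ((j : Int) + 1) = ((j + 1 : Nat) : Int) by push_cast; ring]
        have hstep : (List.range (j + 1)).countP (fun i => decide (m i))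
            = (List.range j).countP (fun i => decide (m i)) + (if m j then 1 else 0) := by
          rw [List.range_succ, List.countP_append]
          by_cases hb : m j <;> simp [hb]
        by_cases hb : m j
        · rw [if_pos ((hm j).1 hb)]
          rw [show (((List.range j).countP (fun i => decide (m i)) : Nat) : Int) + 1
              = (((List.range (j + 1)).countP (fun i => decide (m i)) : Nat) : Int) by
            rw [hstep, if_pos hb]; push_cast; ring]
          rw [ih (j + 1) _ (by omega) (by omega)]
          simp only [Nat.cast_inj]
          by_cases hS : (List.range share).countP (fun i => decide (m i)) = share
          · by_cases hj1 : j + 1 = share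
            · have hc : (List.range (j + 1)).countP (fun i => decide (m i)) = share := by
                rw [hj1]; exact hS
              rw [if_pos hc, if_neg (by omega), if_pos ⟨hjlt, hS⟩]
            · have hne : (List.range (j + 1)).countP (fun i => decide (m i)) ≠ share := by
                have := hcle (j + 1); omega
              rw [if_neg hne, if_pos ⟨by omega, hS⟩, if_pos ⟨hjlt, hS⟩]
          · have hne : (List.range (j + 1)).countP (fun i => decide (m i)) ≠ share := by
              by_cases hj1 : j + 1 = share
              · rw [hj1]; exact hS
              · have := hcle (j + 1); omega
            rw [if_neg hne, if_neg (by tauto), if_neg (by tauto)]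
        · rw [if_neg (fun h => hb ((hm j).2 h))]
          rw [show (((List.range j).countP (fun i => decide (m i)) : Nat) : Int)
              = (((List.range (j + 1)).countP (fun i => decide (m i)) : Nat) : Int) by
            rw [hstep, if_neg hb]; norm_num]
          rw [ih (j + 1) _ (by omega) (by omega)]
          simp only [Nat.cast_inj]
          by_cases hS : (List.range share).countP (fun i => decide (m i)) = share
          · by_cases hj1 : j + 1 = share
            · have hc : (List.range (j + 1)).countP (fun i => decide (m i)) = share := by
                rw [hj1]; exact hS
              rw [if_pos hc, if_neg (by omega), if_pos ⟨hjlt, hS⟩]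
            · have hne : (List.range (j + 1)).countP (fun i => decide (m i)) ≠ share := by
                have := hcle (j + 1); omega
              rw [if_neg hne, if_pos ⟨by omega, hS⟩, if_pos ⟨hjlt, hS⟩]
          · have hne : (List.range (j + 1)).countP (fun i => decide (m i)) ≠ share := by
              by_cases hj1 : j + 1 = share
              · rw [hj1]; exact hS
              · have := hcle (j + 1); omega
            rw [if_neg hne, if_neg (by tauto), if_neg (by tauto)]
  intro j c l hj hc
  subst hc
  exact H (share - j) j l (by omega) hj

-- ---- Section 2: toChars vs Nat.digits ----

lemma pvToDigitsCore_eq :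
    ∀ (fuel n : Nat) (acc : List Char), n < fuel →
      Nat.toDigitsCore 10 fuel n acc
        = (if n = 0 then ['0'] else ((Nat.digits 10 n).map Nat.digitChar).reverse) ++ acc := by
  intro fuel
  induction fuel with
  | zero => intro n acc h; omega
  | succ fuel ih =>
    intro n acc h
    rw [Nat.toDigitsCore]
    by_cases h0 : n / 10 = 0
    · rw [if_pos h0]
      by_cases hn : n = 0
      · subst hn; simp [Nat.digitChar]
      · have hlt : n < 10 := by omega
        rw [if_neg hn, Nat.digits_def' (by norm_num : 1 < 10) (by omega : 0 < n), h0]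
        have : n % 10 = n := Nat.mod_eq_of_lt hlt
        simp [this]
    · rw [if_neg h0]
      have hn : n ≠ 0 := by omega
      have hlt : n / 10 < fuel := by omega
      rw [ih (n / 10) _ hlt, if_neg h0,
        Nat.digits_def' (by norm_num : 1 < 10) (by omega : 0 < n), if_neg hn]
      simp

lemma pvToChars_natCast (n : Nat) (h : 0 < n) :
    PySem.Int.toChars (n : Int) = ((Nat.digits 10 n).map Nat.digitChar).reverse := by
  have h1 : ¬ ((n : Int) < 0) := by omega
  have h2 : ((n : Int)).toNat = n := Int.toNat_natCast n
  rw [PySem.Int.toChars]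
  rw [if_neg h1, h2, Nat.toDigits, pvToDigitsCore_eq (n + 1) n [] (by omega),
    if_neg (by omega : ¬ n = 0), List.append_nil]

lemma pvDigitChar_inj {a b : Nat} (ha : a < 10) (hb : b < 10)
    (h : Nat.digitChar a = Nat.digitChar b) : a = b := by
  interval_cases a <;> interval_cases b <;> simp_all [Nat.digitChar]

-- ---- Section 3: palindrome characterizations ----

-- half-index matching is full palindromicity (even length)
lemma pvHalf_palindrome (t : List Char) (share : Nat) (hlen : t.length = 2 * share) :
    (∀ i : Nat, i < share → t[i]? = t[t.length - 1 - i]?) ↔ t.reverse = t := by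
  constructor
  · intro hhalf
    apply List.ext_getElem?
    intro i
    by_cases hi : i < t.length
    · rw [List.getElem?_reverse hi]
      by_cases h1 : i < share
      · exact (hhalf i h1).symm
      · have h2 : t.length - 1 - i < share := by omega
        have := hhalf (t.length - 1 - i) h2
        have harith : t.length - 1 - (t.length - 1 - i) = i := by omega
        rw [harith] at this
        exact this
    · rw [List.getElem?_eq_none (by simpa using (by omega : t.length ≤ i)),
        List.getElem?_eq_none (by omega : t.length ≤ i)]
  · intro hrev i hi
    have h1 : i < t.length := by omega
    conv_lhs => rw [← hrev]
    rw [List.getElem?_reverse h1]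

lemma pvMapDc_rev_iff (l : List Nat) (hl : ∀ x ∈ l, x < 10) :
    (l.map Nat.digitChar).reverse = l.map Nat.digitChar ↔ l.reverse = l := by
  constructor
  · intro h
    apply List.ext_getElem (by simp)
    intro i h1 h2
    have hlen : i < l.length := h2
    have hlen' : i < (l.map Nat.digitChar).reverse.length := by simpa using hlen
    have h' := List.getElem_of_eq h (i := i) hlen'
    rw [List.getElem_reverse, List.getElem_map, List.getElem_map] at h'
    simp only [List.length_map] at h'
    rw [List.getElem_reverse]
    exact pvDigitChar_inj (hl _ (List.getElem_mem _)) (hl _ (List.getElem_mem _)) h'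
  · intro h
    conv_lhs => rw [← List.map_reverse, h]

-- A's test, for num = ↑(m+1), in digit form
lemma pvTest_digits (m : Nat) :
    pvTest ((m + 1 : Nat) : Int) ↔
      (Nat.digits 10 (m + 1)).length % 2 = 0 ∧
        (Nat.digits 10 (m + 1)).reverse = Nat.digits 10 (m + 1) := by
  set ds := Nat.digits 10 (m + 1) with hds
  set cs := (ds.map Nat.digitChar).reverse with hcs
  have hchars : PySem.Int.toChars ((m + 1 : Nat) : Int) = cs := pvToChars_natCast (m + 1) (by omega)
  have hlist : (PySem.Int.toStr ((m + 1 : Nat) : Int)).toList = cs := by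
    rw [PySem.Int.toList_toStr, hchars]
  have hlencs : cs.length = ds.length := by simp [hcs]
  have hlen : PySem.Str.len (PySem.Int.toStr ((m + 1 : Nat) : Int)) = (ds.length : Int) := by
    rw [PySem.Str.len_eq, hlist, hlencs]
  have hdsne : ds ≠ [] := Nat.digits_ne_nil_iff_ne_zero.2 (by omega)
  have hLpos : 0 < ds.length := List.length_pos_iff.2 hdsne
  have hmod : PySem.Int.mod ((ds.length : Nat) : Int) 2 = ((ds.length % 2 : Nat) : Int) := by
    exact_mod_cast PySem.Int.mod_natCast ds.length 2
  have hdiv : PySem.Int.floordiv ((ds.length : Nat) : Int) 2 = ((ds.length / 2 : Nat) : Int) := by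
    exact_mod_cast PySem.Int.floordiv_natCast ds.length 2
  have hget : ∀ i : Nat, i < ds.length / 2 →
      (PySem.Str.pyGet? (PySem.Int.toStr ((m + 1 : Nat) : Int)) (i : Int)
        = PySem.Str.pyGet? (PySem.Int.toStr ((m + 1 : Nat) : Int)) (-1 - (i : Int))
      ↔ cs[i]? = cs[cs.length - 1 - i]?) := by
    intro i hi
    have hi1 : i + 1 ≤ cs.length := by
      rw [hlencs]; omega
    have hneg : (-1 - (i : Int)) = -((i + 1 : Nat) : Int) := by push_cast; ring
    rw [PySem.Str.pyGet?_eq, PySem.Str.pyGet?_eq, PySem.Chars.pyGet?_eq_listPyGet?,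
      PySem.Chars.pyGet?_eq_listPyGet?, hlist, hneg,
      PySem.List.pyGet?_neg_natCast cs (i + 1) (by omega) hi1,
      PySem.List.pyGet?_natCast]
    have : cs.length - (i + 1) = cs.length - 1 - i := by omega
    rw [this]
  unfold pvTest
  rw [hlen, hmod, hdiv]
  constructor
  · rintro ⟨h1, h2⟩
    have heven : ds.length % 2 = 0 := by exact_mod_cast h1
    refine ⟨heven, ?_⟩
    have hhalf : ∀ i : Nat, i < cs.length / 2 → cs[i]? = cs[cs.length - 1 - i]? := by
      intro i hi
      have hi' : i < ds.length / 2 := by omega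
      exact (hget i hi').1 (h2 i (by rw [Int.toNat_natCast]; exact hi'))
    have hrev : cs.reverse = cs :=
      (pvHalf_palindrome cs (cs.length / 2) (by omega)).1 hhalf
    have hmap_eq : ds.map Nat.digitChar = cs.reverse := by
      rw [hcs, List.reverse_reverse]
    have hmaprev : (ds.map Nat.digitChar).reverse = ds.map Nat.digitChar := by
      rw [hmap_eq, List.reverse_reverse]
      exact hrev.symm
    exact (pvMapDc_rev_iff ds (fun x hx => Nat.digits_lt_base (by norm_num) hx)).1
      (by rw [hmaprev])
  · rintro ⟨h1, h2⟩
    refine ⟨by exact_mod_cast h1, ?_⟩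
    intro i hi
    rw [Int.toNat_natCast] at hi
    have hmaprev : (ds.map Nat.digitChar).reverse = ds.map Nat.digitChar :=
      (pvMapDc_rev_iff ds (fun x hx => Nat.digits_lt_base (by norm_num) hx)).2 h2
    have hrev : cs.reverse = cs := by
      rw [hcs, List.reverse_reverse]
      exact hmaprev.symm
    have heven : ds.length % 2 = 0 := by exact_mod_cast h1
    refine (hget i hi).2 ?_
    exact (pvHalf_palindrome cs (cs.length / 2) (by omega)).2 hrev i (by omega)

lemma pvA_filter (number : Int) :
    create_even_number_method number
      = (PySem.List.pyRange 1 (number + 1) 1).filter pvTestB := by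
  unfold create_even_number_method
  have hbody : ∀ (acc : List Int), ∀ num ∈ PySem.List.pyRange 1 (number + 1) 1,
      (fun (even_number_list : List Int) (num : Int) =>
        let len_of_number_remain := PySem.Int.mod (PySem.Str.len (PySem.Int.toStr num)) 2
        let len_of_number_share := PySem.Int.floordiv (PySem.Str.len (PySem.Int.toStr num)) 2
        if len_of_number_remain = 0 then
          ((PySem.List.pyRange 0 len_of_number_share 1).foldl (fun (st : Int × List Int) ct =>
            let count_method :=
              if PySem.Str.pyGet? (PySem.Int.toStr num) ct
                  = PySem.Str.pyGet? (PySem.Int.toStr num) (-1 - ct)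
              then st.1 + 1 else st.1
            (count_method, if count_method = len_of_number_share then st.2 ++ [num] else st.2))
            (0, even_number_list)).2
        else even_number_list) acc num
      = if pvTestB num then acc ++ [num] else acc := by
    intro acc num hmem
    have h1 : 1 ≤ num := ((PySem.List.mem_pyRange_one).1 hmem).1
    obtain ⟨mm, rfl⟩ : ∃ mm : Nat, num = ((mm + 1 : Nat) : Int) :=
      ⟨(num - 1).toNat, by omega⟩
    dsimp only
    set ds := Nat.digits 10 (mm + 1) with hds
    have hchars : PySem.Int.toChars ((mm + 1 : Nat) : Int) = (ds.map Nat.digitChar).reverse :=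
      pvToChars_natCast (mm + 1) (by omega)
    have hlen : PySem.Str.len (PySem.Int.toStr ((mm + 1 : Nat) : Int)) = ((ds.length : Nat) : Int) := by
      rw [PySem.Str.len_eq, PySem.Int.toList_toStr, hchars]; simp
    have hdsne : ds ≠ [] := Nat.digits_ne_nil_iff_ne_zero.2 (by omega)
    have hLpos : 0 < ds.length := List.length_pos_iff.2 hdsne
    have hmod : PySem.Int.mod ((ds.length : Nat) : Int) 2 = ((ds.length % 2 : Nat) : Int) := by
      exact_mod_cast PySem.Int.mod_natCast ds.length 2
    have hdiv : PySem.Int.floordiv ((ds.length : Nat) : Int) 2 = ((ds.length / 2 : Nat) : Int) := by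
      exact_mod_cast PySem.Int.floordiv_natCast ds.length 2
    rw [hlen, hmod, hdiv]
    by_cases heven : ds.length % 2 = 0
    · rw [if_pos (by exact_mod_cast heven)]
      have hpos2 : 0 < ds.length / 2 := by omega
      have hInner := pvInner (PySem.Int.toStr ((mm + 1 : Nat) : Int)) ((mm + 1 : Nat) : Int)
        ((ds.length / 2 : Nat) : Int) (ds.length / 2) rfl hpos2
        (fun i : Nat => PySem.Str.pyGet? (PySem.Int.toStr ((mm + 1 : Nat) : Int)) (i : Int)
          = PySem.Str.pyGet? (PySem.Int.toStr ((mm + 1 : Nat) : Int)) (-1 - (i : Int)))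
        (fun i => Iff.rfl) 0 0 acc (by omega) (by simp)
      simp only [Nat.cast_zero] at hInner
      rw [hInner]
      have hforall : ((List.range (ds.length / 2)).countP (fun i : Nat => decide
            (PySem.Str.pyGet? (PySem.Int.toStr ((mm + 1 : Nat) : Int)) (i : Int)
              = PySem.Str.pyGet? (PySem.Int.toStr ((mm + 1 : Nat) : Int)) (-1 - (i : Int))))
            = ds.length / 2)
          ↔ (∀ i : Nat, i < ds.length / 2 →
            PySem.Str.pyGet? (PySem.Int.toStr ((mm + 1 : Nat) : Int)) (i : Int)
              = PySem.Str.pyGet? (PySem.Int.toStr ((mm + 1 : Nat) : Int)) (-1 - (i : Int))) := by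
        have := List.countP_eq_length (l := List.range (ds.length / 2))
          (p := fun i : Nat => decide
            (PySem.Str.pyGet? (PySem.Int.toStr ((mm + 1 : Nat) : Int)) (i : Int)
              = PySem.Str.pyGet? (PySem.Int.toStr ((mm + 1 : Nat) : Int)) (-1 - (i : Int))))
        simp only [List.length_range, List.mem_range, decide_eq_true_eq] at this
        exact this
      have hTest : pvTest ((mm + 1 : Nat) : Int) ↔ (∀ i : Nat, i < ds.length / 2 →
          PySem.Str.pyGet? (PySem.Int.toStr ((mm + 1 : Nat) : Int)) (i : Int)
            = PySem.Str.pyGet? (PySem.Int.toStr ((mm + 1 : Nat) : Int)) (-1 - (i : Int))) := by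
        unfold pvTest
        rw [hlen, hmod, hdiv]
        simp only [Int.toNat_natCast, Nat.cast_eq_zero]
        constructor
        · rintro ⟨-, h⟩
          exact h
        · intro h
          exact ⟨heven, h⟩
      by_cases hPal : ∀ i : Nat, i < ds.length / 2 →
          PySem.Str.pyGet? (PySem.Int.toStr ((mm + 1 : Nat) : Int)) (i : Int)
            = PySem.Str.pyGet? (PySem.Int.toStr ((mm + 1 : Nat) : Int)) (-1 - (i : Int))
      · rw [if_pos ⟨hpos2, hforall.2 hPal⟩, if_pos ((pvTestB_iff _).2 (hTest.2 hPal))]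
      · rw [if_neg (fun hc => hPal (hforall.1 hc.2)),
          if_neg (fun hc => hPal (hTest.1 ((pvTestB_iff _).1 hc)))]
    · rw [if_neg (fun hc => heven (by exact_mod_cast hc))]
      rw [if_neg (fun ht => heven (by
        have := ((pvTestB_iff _).1 ht).1
        rw [hlen, hmod] at this
        exact_mod_cast this))]
  rw [PySem.List.foldl_congr_mem _ _ _ _ hbody, PySem.List.foldl_append_if_eq_filter]
  simp

-- ---- Section 4: mirror arithmetic ----

lemma pvRevLoop_eq (t : Nat) : ∀ r : Int,
    pvRevLoop r (t : Int) = r * 10 ^ (Nat.digits 10 t).length + (pvRv t : Int) := by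
  induction t using Nat.strong_induction_on with
  | _ t ih =>
    intro r
    rw [pvRevLoop]
    by_cases ht : 0 < t
    · rw [dif_pos (by exact_mod_cast ht)]
      have hmod : PySem.Int.mod (t : Int) 10 = ((t % 10 : Nat) : Int) := by
        exact_mod_cast PySem.Int.mod_natCast t 10
      have hdiv : PySem.Int.floordiv (t : Int) 10 = ((t / 10 : Nat) : Int) := by
        exact_mod_cast PySem.Int.floordiv_natCast t 10
      rw [hmod, hdiv, ih (t / 10) (by omega) (r * 10 + ((t % 10 : Nat) : Int))]
      rw [Nat.digits_def' (by norm_num : 1 < 10) ht]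
      have hrv : pvRv t = pvRv (t / 10) + 10 ^ (Nat.digits 10 (t / 10)).length * (t % 10) := by
        unfold pvRv
        rw [Nat.digits_def' (by norm_num : 1 < 10) ht, List.reverse_cons, Nat.ofDigits_append]
        simp [Nat.ofDigits_singleton]
      rw [hrv, List.length_cons, pow_succ]
      push_cast
      ring
    · rw [dif_neg (by exact_mod_cast ht)]
      have : t = 0 := by omega
      subst this
      simp [pvRv]

lemma pvDigits_mirror (f : Nat) (hf : 1 ≤ f) :
    Nat.digits 10 (pvMirror f) = (Nat.digits 10 f).reverse ++ Nat.digits 10 f := by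
  have hne : Nat.digits 10 f ≠ [] := Nat.digits_ne_nil_iff_ne_zero.2 (by omega)
  have hval : pvMirror f = Nat.ofDigits 10 ((Nat.digits 10 f).reverse ++ Nat.digits 10 f) := by
    rw [Nat.ofDigits_append, Nat.ofDigits_digits, List.length_reverse]
    unfold pvMirror pvRv
    ring
  rw [hval]
  refine Nat.digits_ofDigits 10 (by norm_num) _ ?_ ?_
  · intro l hl
    rcases List.mem_append.1 hl with h | h
    · exact Nat.digits_lt_base (by norm_num) (List.mem_reverse.1 h)
    · exact Nat.digits_lt_base (by norm_num) h
  · intro hne2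
    rw [List.getLast_append_of_right_ne_nil _ _ hne]
    exact Nat.getLast_digit_ne_zero 10 (by omega)

lemma pvLen_digits_iff (f h : Nat) (hh : 1 ≤ h) :
    (Nat.digits 10 f).length = h ↔ 10 ^ (h - 1) ≤ f ∧ f < 10 ^ h := by
  constructor
  · intro hlen
    have hne : f ≠ 0 := by
      intro h0; subst h0; simp at hlen; omega
    have h1 : f < 10 ^ (Nat.digits 10 f).length := Nat.lt_base_pow_length_digits (by norm_num)
    have h2 : 10 ^ (Nat.digits 10 f).length ≤ 10 * f := Nat.base_pow_length_digits_le 10 f (by norm_num) hne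
    rw [hlen] at h1 h2
    refine ⟨?_, h1⟩
    have : 10 ^ h = 10 * 10 ^ (h - 1) := by
      rw [← pow_succ']
      congr 1
      omega
    rw [this] at h2
    omega
  · rintro ⟨hlo, hhi⟩
    have hne : f ≠ 0 := by
      have : 0 < 10 ^ (h - 1) := pow_pos (by norm_num : (0:ℕ) < 10) _
      omega
    have h1 : f < 10 ^ (Nat.digits 10 f).length := Nat.lt_base_pow_length_digits (by norm_num)
    have h2 : 10 ^ (Nat.digits 10 f).length ≤ 10 * f := Nat.base_pow_length_digits_le 10 f (by norm_num) hne
    set L := (Nat.digits 10 f).length with hL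
    rcases lt_trichotomy L h with hlt | heq | hgt
    · exfalso
      have : 10 ^ L ≤ 10 ^ (h - 1) := Nat.pow_le_pow_right (by norm_num) (by omega)
      omega
    · exact heq
    · exfalso
      have : 10 * 10 ^ h ≤ 10 ^ L := by
        rw [← pow_succ']
        exact Nat.pow_le_pow_right (by norm_num) (by omega)
      omega

lemma pvRv_lt (f : Nat) : pvRv f < 10 ^ (Nat.digits 10 f).length := by
  have := Nat.ofDigits_lt_base_pow_length (b := 10) (l := (Nat.digits 10 f).reverse)
    (by norm_num) (fun x hx => Nat.digits_lt_base (by norm_num) (List.mem_reverse.1 hx))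
  simpa using this

lemma pvMirror_mono {a b h : Nat} (ha : 10 ^ (h - 1) ≤ a) (hab : a < b) (hb : b < 10 ^ h)
    (hh : 1 ≤ h) : pvMirror a < pvMirror b := by
  have hb' : 10 ^ (h - 1) ≤ b := le_trans ha (le_of_lt hab)
  have hla : (Nat.digits 10 a).length = h := (pvLen_digits_iff a h hh).2 ⟨ha, lt_trans hab hb⟩
  have hlb : (Nat.digits 10 b).length = h := (pvLen_digits_iff b h hh).2 ⟨hb', hb⟩
  have hrva : pvRv a < 10 ^ h := by have := pvRv_lt a; rwa [hla] at this
  unfold pvMirror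
  rw [hla, hlb]
  have h1 : a * 10 ^ h + pvRv a < (a + 1) * 10 ^ h := by
    have : 0 < 10 ^ h := pow_pos (by norm_num : (0:ℕ) < 10) _
    nlinarith
  have h2 : (a + 1) * 10 ^ h ≤ b * 10 ^ h := Nat.mul_le_mul_right _ (by omega)
  omega

lemma pvMirror_bounds {f h : Nat} (hh : 1 ≤ h) (h1 : 10 ^ (h - 1) ≤ f) (h2 : f < 10 ^ h) :
    10 ^ (2 * h - 1) ≤ pvMirror f ∧ pvMirror f < 10 ^ (2 * h) := by
  have hfpos : 1 ≤ f := le_trans (Nat.one_le_pow _ _ (by norm_num)) h1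
  have hlf : (Nat.digits 10 f).length = h := (pvLen_digits_iff f h hh).2 ⟨h1, h2⟩
  have hlen : (Nat.digits 10 (pvMirror f)).length = 2 * h := by
    rw [pvDigits_mirror f hfpos, List.length_append, List.length_reverse, hlf]
    omega
  have := (pvLen_digits_iff (pvMirror f) (2 * h) (by omega)).1 hlen
  exact ⟨this.1, this.2⟩

-- the digit form of A's test is exactly "x is a mirrored half" (x = m+1 ≥ 1)
lemma pvPal_iff_mirror (m : Nat) :
    ((Nat.digits 10 (m + 1)).length % 2 = 0 ∧
        (Nat.digits 10 (m + 1)).reverse = Nat.digits 10 (m + 1))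
      ↔ ∃ h f : Nat, 1 ≤ h ∧ 10 ^ (h - 1) ≤ f ∧ f < 10 ^ h ∧ m + 1 = pvMirror f := by
  constructor
  · rintro ⟨heven, hpal⟩
    set ds := Nat.digits 10 (m + 1) with hds
    have hdsne : ds ≠ [] := Nat.digits_ne_nil_iff_ne_zero.2 (by omega)
    have hLpos : 0 < ds.length := List.length_pos_iff.2 hdsne
    set h' := ds.length / 2 with hh'
    have hL : ds.length = 2 * h' := by omega
    have hh'pos : 1 ≤ h' := by omega
    set hi := ds.drop h' with hhi
    have hhine : hi ≠ [] := by
      rw [hhi, ← List.length_pos_iff, List.length_drop]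
      omega
    have hlenhi : hi.length = h' := by
      rw [hhi, List.length_drop]; omega
    set f := Nat.ofDigits 10 hi with hf
    have hdigf : Nat.digits 10 f = hi := by
      refine Nat.digits_ofDigits 10 (by norm_num) hi
        (fun x hx => Nat.digits_lt_base (by norm_num) (List.mem_of_mem_drop hx)) ?_
      intro hne
      have hsplit : ds = ds.take h' ++ hi := (List.take_append_drop h' ds).symm
      have h5 : ds.getLast? = hi.getLast? := by
        conv_lhs => rw [hsplit]
        exact List.getLast?_append_of_ne_nil _ hne
      rw [List.getLast?_eq_some_getLast hdsne, List.getLast?_eq_some_getLast hne] at h5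
      have h6 : hi.getLast hne = ds.getLast hdsne := (Option.some.inj h5).symm
      rw [h6]
      exact Nat.getLast_digit_ne_zero 10 (by omega)
    have hlenf : (Nat.digits 10 f).length = h' := by rw [hdigf, hlenhi]
    have htake : ds.take h' = hi.reverse := by
      have hsplit : ds = ds.take h' ++ hi := (List.take_append_drop h' ds).symm
      have hrev : hi.reverse ++ (ds.take h').reverse = ds := by
        conv_rhs => rw [← hpal]
        conv_rhs => rw [hsplit]
        rw [List.reverse_append]
      have hlenrev : (hi.reverse).length = h' := by simpa using hlenhi
      have := congrArg (List.take h') hrev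
      rw [List.take_left' hlenrev] at this
      exact this.symm
    refine ⟨h', f, hh'pos, ?_, ?_, ?_⟩
    · exact ((pvLen_digits_iff f h' hh'pos).1 hlenf).1
    · exact ((pvLen_digits_iff f h' hh'pos).1 hlenf).2
    · have : m + 1 = Nat.ofDigits 10 ds := (Nat.ofDigits_digits 10 (m + 1)).symm
      rw [this]
      conv_lhs => rw [(List.take_append_drop h' ds).symm]
      rw [Nat.ofDigits_append, htake]
      unfold pvMirror pvRv
      rw [hdigf, ← hhi, ← hf, List.length_reverse]
      ring
  · rintro ⟨h, f, hh, hlo, hhid, heq⟩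
    have hfpos : 1 ≤ f := le_trans (Nat.one_le_pow _ _ (by norm_num)) hlo
    have hlenf : (Nat.digits 10 f).length = h := (pvLen_digits_iff f h hh).2 ⟨hlo, hhid⟩
    rw [heq, pvDigits_mirror f hfpos]
    constructor
    · rw [List.length_append, List.length_reverse, hlenf]
      omega
    · rw [List.reverse_append, List.reverse_reverse]

-- ---- Section 5: B's loop ----

lemma pvOuter_mem (number : Int) :
    ∀ (n k : Nat) (acc : List Int), 1 ≤ k → (number + 1 - 10 ^ (2 * k - 1)).toNat ≤ n →
    ∀ x : Int,
      x ∈ pvOuterLoop number ((10 : Int) ^ (k - 1)) ((10 : Int) ^ k) acc ↔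
        x ∈ acc ∨ (x ≤ number ∧ ∃ h f : Nat, k ≤ h ∧ 10 ^ (h - 1) ≤ f ∧ f < 10 ^ h ∧
          x = (pvMirror f : Int)) := by
  have hFalse : ∀ (k : Nat) (acc : List Int) (x : Int), 1 ≤ k →
      ¬ ((10 : Int) ^ (k - 1) * 10 ^ k ≤ number) →
      (x ∈ pvOuterLoop number ((10 : Int) ^ (k - 1)) ((10 : Int) ^ k) acc ↔
        x ∈ acc ∨ (x ≤ number ∧ ∃ h f : Nat, k ≤ h ∧ 10 ^ (h - 1) ≤ f ∧ f < 10 ^ h ∧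
          x = (pvMirror f : Int))) := by
    intro k acc x hk hcond
    rw [pvOuterLoop, dif_neg (by tauto)]
    have hkk : (10 : Int) ^ (k - 1) * 10 ^ k = 10 ^ (2 * k - 1) := by
      rw [← pow_add]; congr 1; omega
    constructor
    · exact Or.inl
    · rintro (hx | ⟨hxle, h, f, hkh, hlo, hhi, hxeq⟩)
      · exact hx
      · exfalso
        have hb := (pvMirror_bounds (by omega : 1 ≤ h) hlo hhi).1
        have hcast : ((10 : Int) ^ (2 * h - 1)) ≤ x := by
          rw [hxeq]; exact_mod_cast hb
        have hmono : ((10 : Int) ^ (2 * k - 1)) ≤ 10 ^ (2 * h - 1) :=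
          pow_le_pow_right₀ (by norm_num) (by omega)
        rw [hkk] at hcond
        omega
  intro n
  induction n with
  | zero =>
    intro k acc hk hmu x
    refine hFalse k acc x hk ?_
    have hkk : (10 : Int) ^ (k - 1) * 10 ^ k = 10 ^ (2 * k - 1) := by
      rw [← pow_add]; congr 1; omega
    rw [hkk]
    omega
  | succ n ih =>
    intro k acc hk hmu x
    by_cases hcond : (10 : Int) ^ (k - 1) * 10 ^ k ≤ number
    · have hp1 : (0 : Int) < 10 ^ (k - 1) := pow_pos (by norm_num) _
      have hp2 : (10 : Int) ^ (k - 1) < 10 ^ k := pow_lt_pow_right₀ (by norm_num) (by omega)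
      rw [pvOuterLoop, dif_pos ⟨hp1, hp2, hcond⟩]
      rw [PySem.List.foldl_append_ite
        (p := fun first => first * (10 : Int) ^ k + pvRevLoop 0 first ≤ number)
        (f := fun first => first * (10 : Int) ^ k + pvRevLoop 0 first)]
      have h10 : (10 : Int) ^ k * 10 = 10 ^ (k + 1) := by rw [pow_succ]
      rw [h10]
      have hkk : (10 : Int) ^ (k - 1) * 10 ^ k = 10 ^ (2 * k - 1) := by
        rw [← pow_add]; congr 1; omega
      have hmu' : (number + 1 - 10 ^ (2 * (k + 1) - 1)).toNat ≤ n := by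
        have e1 : (10 : Int) ^ (2 * (k + 1) - 1) = 10 ^ (2 * k - 1) * 100 := by
          rw [show 2 * (k + 1) - 1 = (2 * k - 1) + 2 by omega, pow_add]
          norm_num
        have hpos : (1 : Int) ≤ 10 ^ (2 * k - 1) := one_le_pow₀ (by norm_num)
        rw [hkk] at hcond
        omega
      have ihx := ih (k + 1)
        (acc ++ List.map (fun first => first * (10 : Int) ^ k + pvRevLoop 0 first)
          (List.filter (fun first => decide (first * (10 : Int) ^ k + pvRevLoop 0 first ≤ number))
            (PySem.List.pyRange ((10 : Int) ^ (k - 1)) ((10 : Int) ^ k) 1)))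
        (by omega) hmu' x
      simp only [Nat.add_sub_cancel] at ihx
      rw [ihx, List.mem_append]
      have hmirror : ∀ f : Nat, 10 ^ (k - 1) ≤ f → f < 10 ^ k →
          ((f : Int) * (10 : Int) ^ k + pvRevLoop 0 (f : Int) = (pvMirror f : Int)) := by
        intro f hlo hhi
        have hlenf : (Nat.digits 10 f).length = k := (pvLen_digits_iff f k hk).2 ⟨hlo, hhi⟩
        rw [pvRevLoop_eq f 0, hlenf]
        unfold pvMirror
        rw [hlenf]
        push_cast
        ring
      constructor
      · rintro ((hx | hblk) | ⟨hxle, h, f, hkh, hlo, hhi, hxeq⟩)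
        · exact Or.inl hx
        · rcases List.mem_map.1 hblk with ⟨first, hfmem, hfx⟩
          rcases List.mem_filter.1 hfmem with ⟨hfrange, hfle⟩
          rcases PySem.List.mem_pyRange_one.1 hfrange with ⟨hflo, hfhi⟩
          have hfpos : 0 < first := lt_of_lt_of_le hp1 hflo
          obtain ⟨fN, rfl⟩ : ∃ fN : Nat, first = (fN : Int) :=
            ⟨first.toNat, by omega⟩
          have hloN : 10 ^ (k - 1) ≤ fN := by exact_mod_cast hflo
          have hhiN : fN < 10 ^ k := by exact_mod_cast hfhi
          have hg := hmirror fN hloN hhiN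
          have hle : (fN : Int) * (10 : Int) ^ k + pvRevLoop 0 (fN : Int) ≤ number :=
            of_decide_eq_true hfle
          refine Or.inr ⟨?_, k, fN, le_refl k, hloN, hhiN, ?_⟩
          · rw [← hfx, hg] at *
            exact hle
          · rw [← hfx, hg]
        · exact Or.inr ⟨hxle, h, f, by omega, hlo, hhi, hxeq⟩
      · rintro (hx | ⟨hxle, h, f, hkh, hlo, hhi, hxeq⟩)
        · exact Or.inl (Or.inl hx)
        · by_cases hhk : h = k
          · subst hhk
            refine Or.inl (Or.inr ?_)
            refine List.mem_map.2 ⟨(f : Int), ?_, ?_⟩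
            · refine List.mem_filter.2 ⟨PySem.List.mem_pyRange_one.2 ⟨?_, ?_⟩, ?_⟩
              · exact_mod_cast Nat.cast_le.2 hlo
              · exact_mod_cast Nat.cast_lt.2 hhi
              · exact decide_eq_true (by rw [hmirror f hlo hhi, ← hxeq]; exact hxle)
            · rw [hmirror f hlo hhi, ← hxeq]
          · exact Or.inr ⟨hxle, h, f, by omega, hlo, hhi, hxeq⟩
    · exact hFalse k acc x hk hcond

lemma pvOuter_pairwise (number : Int) :
    ∀ (n k : Nat) (acc : List Int), 1 ≤ k → (number + 1 - 10 ^ (2 * k - 1)).toNat ≤ n →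
      acc.Pairwise (· < ·) → (∀ a ∈ acc, a < (10 : Int) ^ (2 * k - 1)) →
      (pvOuterLoop number ((10 : Int) ^ (k - 1)) ((10 : Int) ^ k) acc).Pairwise (· < ·) := by
  intro n
  induction n with
  | zero =>
    intro k acc hk hmu hpw hbd
    have hkk : (10 : Int) ^ (k - 1) * 10 ^ k = 10 ^ (2 * k - 1) := by
      rw [← pow_add]; congr 1; omega
    rw [pvOuterLoop, dif_neg (by rintro ⟨-, -, h3⟩; rw [hkk] at h3; omega)]
    exact hpw
  | succ n ih =>
    intro k acc hk hmu hpw hbd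
    have hkk : (10 : Int) ^ (k - 1) * 10 ^ k = 10 ^ (2 * k - 1) := by
      rw [← pow_add]; congr 1; omega
    by_cases hcond : (10 : Int) ^ (k - 1) * 10 ^ k ≤ number
    · have hp1 : (0 : Int) < 10 ^ (k - 1) := pow_pos (by norm_num) _
      have hp2 : (10 : Int) ^ (k - 1) < 10 ^ k := pow_lt_pow_right₀ (by norm_num) (by omega)
      rw [pvOuterLoop, dif_pos ⟨hp1, hp2, hcond⟩]
      rw [PySem.List.foldl_append_ite
        (p := fun first => first * (10 : Int) ^ k + pvRevLoop 0 first ≤ number)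
        (f := fun first => first * (10 : Int) ^ k + pvRevLoop 0 first)]
      have h10 : (10 : Int) ^ k * 10 = 10 ^ (k + 1) := by rw [pow_succ]
      rw [h10]
      have hmu' : (number + 1 - 10 ^ (2 * (k + 1) - 1)).toNat ≤ n := by
        have e1 : (10 : Int) ^ (2 * (k + 1) - 1) = 10 ^ (2 * k - 1) * 100 := by
          rw [show 2 * (k + 1) - 1 = (2 * k - 1) + 2 by omega, pow_add]
          norm_num
        have hpos : (1 : Int) ≤ 10 ^ (2 * k - 1) := one_le_pow₀ (by norm_num)
        rw [hkk] at hcond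
        omega
      have hmirror : ∀ f : Nat, 10 ^ (k - 1) ≤ f → f < 10 ^ k →
          ((f : Int) * (10 : Int) ^ k + pvRevLoop 0 (f : Int) = (pvMirror f : Int)) := by
        intro f hlo hhi
        have hlenf : (Nat.digits 10 f).length = k := (pvLen_digits_iff f k hk).2 ⟨hlo, hhi⟩
        rw [pvRevLoop_eq f 0, hlenf]
        unfold pvMirror
        rw [hlenf]
        push_cast
        ring
      -- every element of the new block is ↑(pvMirror fN) for its fN, within bounds
      have hblk : ∀ b ∈ List.map (fun first => first * (10 : Int) ^ k + pvRevLoop 0 first)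
          (List.filter (fun first => decide (first * (10 : Int) ^ k + pvRevLoop 0 first ≤ number))
            (PySem.List.pyRange ((10 : Int) ^ (k - 1)) ((10 : Int) ^ k) 1)),
          (10 : Int) ^ (2 * k - 1) ≤ b ∧ b < (10 : Int) ^ (2 * k) := by
        intro b hb
        rcases List.mem_map.1 hb with ⟨first, hfmem, hfx⟩
        rcases List.mem_filter.1 hfmem with ⟨hfrange, -⟩
        rcases PySem.List.mem_pyRange_one.1 hfrange with ⟨hflo, hfhi⟩
        obtain ⟨fN, rfl⟩ : ∃ fN : Nat, first = (fN : Int) :=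
          ⟨first.toNat, by omega⟩
        have hloN : 10 ^ (k - 1) ≤ fN := by exact_mod_cast hflo
        have hhiN : fN < 10 ^ k := by exact_mod_cast hfhi
        have hbnd := pvMirror_bounds hk hloN hhiN
        rw [← hfx, hmirror fN hloN hhiN]
        exact ⟨by exact_mod_cast hbnd.1, by exact_mod_cast hbnd.2⟩
      have hpw' : (acc ++ List.map (fun first => first * (10 : Int) ^ k + pvRevLoop 0 first)
          (List.filter (fun first => decide (first * (10 : Int) ^ k + pvRevLoop 0 first ≤ number))
            (PySem.List.pyRange ((10 : Int) ^ (k - 1)) ((10 : Int) ^ k) 1))).Pairwise (· < ·) := by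
        rw [List.pairwise_append]
        refine ⟨hpw, ?_, ?_⟩
        · rw [List.pairwise_map]
          refine List.Pairwise.imp_of_mem ?_
            ((PySem.List.pairwise_lt_pyRange_one _ _).filter _)
          intro a b ha hb hab
          rcases PySem.List.mem_pyRange_one.1 (List.mem_of_mem_filter ha) with ⟨halo, hahi⟩
          rcases PySem.List.mem_pyRange_one.1 (List.mem_of_mem_filter hb) with ⟨hblo, hbhi⟩
          obtain ⟨aN, rfl⟩ : ∃ aN : Nat, a = (aN : Int) := ⟨a.toNat, by omega⟩
          obtain ⟨bN, rfl⟩ : ∃ bN : Nat, b = (bN : Int) := ⟨b.toNat, by omega⟩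
          rw [hmirror aN (by exact_mod_cast halo) (by exact_mod_cast hahi),
            hmirror bN (by exact_mod_cast hblo) (by exact_mod_cast hbhi)]
          exact_mod_cast pvMirror_mono (h := k) (by exact_mod_cast halo)
            (by exact_mod_cast hab) (by exact_mod_cast hbhi) hk
        · intro a ha b hb
          exact lt_of_lt_of_le (hbd a ha) (hblk b hb).1
      have hbd' : ∀ a ∈ acc ++ List.map (fun first => first * (10 : Int) ^ k + pvRevLoop 0 first)
          (List.filter (fun first => decide (first * (10 : Int) ^ k + pvRevLoop 0 first ≤ number))
            (PySem.List.pyRange ((10 : Int) ^ (k - 1)) ((10 : Int) ^ k) 1)),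
          a < (10 : Int) ^ (2 * (k + 1) - 1) := by
        intro a ha
        have hstep : (10 : Int) ^ (2 * k) ≤ 10 ^ (2 * (k + 1) - 1) :=
          pow_le_pow_right₀ (by norm_num) (by omega)
        rcases List.mem_append.1 ha with h | h
        · have h1 := hbd a h
          have h2 : (10 : Int) ^ (2 * k - 1) ≤ 10 ^ (2 * k) :=
            pow_le_pow_right₀ (by norm_num) (by omega)
          omega
        · have := (hblk a h).2
          omega
      exact ih (k + 1) _ (by omega) hmu' hpw' hbd'
    · rw [pvOuterLoop, dif_neg (by tauto)]
      exact hpw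

-- ---- Section 6: assembly ----

lemma pvA_pairwise (number : Int) :
    (create_even_number_method number).Pairwise (· < ·) := by
  rw [pvA_filter]
  exact (PySem.List.pairwise_lt_pyRange_one _ _).filter _

lemma pvA_mem (number x : Int) :
    x ∈ create_even_number_method number ↔ 1 ≤ x ∧ x ≤ number ∧ pvTest x := by
  rw [pvA_filter]
  simp only [List.mem_filter, PySem.List.mem_pyRange_one]
  constructor
  · rintro ⟨⟨h1, h2⟩, h3⟩
    exact ⟨h1, by omega, (pvTestB_iff x).1 h3⟩
  · rintro ⟨h1, h2, h3⟩
    exact ⟨⟨h1, by omega⟩, (pvTestB_iff x).2 h3⟩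

lemma pvB_mem (number x : Int) :
    x ∈ create_even_number_method_alt number ↔ pvEP number x := by
  unfold create_even_number_method_alt pvEP
  have h := pvOuter_mem number (number + 1 - 10 ^ (2 * 1 - 1)).toNat 1 [] (le_refl 1)
    (le_refl _) x
  simp only [pow_one, List.not_mem_nil, false_or] at h
  exact h

lemma pvB_pairwise (number : Int) :
    (create_even_number_method_alt number).Pairwise (· < ·) := by
  unfold create_even_number_method_alt
  have h := pvOuter_pairwise number (number + 1 - 10 ^ (2 * 1 - 1)).toNat 1 [] (le_refl 1)
    (le_refl _) List.Pairwise.nil (by simp)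
  simp only [pow_one] at h
  exact h

lemma pvMem_iff (number x : Int) :
    x ∈ create_even_number_method number ↔ x ∈ create_even_number_method_alt number := by
  rw [pvA_mem, pvB_mem]
  unfold pvEP
  constructor
  · rintro ⟨h1, h2, h3⟩
    obtain ⟨mm, rfl⟩ : ∃ mm : Nat, x = ((mm + 1 : Nat) : Int) := ⟨(x - 1).toNat, by omega⟩
    obtain ⟨h, f, hh, hlo, hhi, heq⟩ := (pvPal_iff_mirror mm).1 ((pvTest_digits mm).1 h3)
    exact ⟨h2, h, f, hh, hlo, hhi, by exact_mod_cast congrArg (Nat.cast (R := Int)) heq⟩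
  · rintro ⟨hle, h, f, hh, hlo, hhi, heq⟩
    have hbnd := pvMirror_bounds hh hlo hhi
    have h1 : 1 ≤ x := by
      rw [heq]
      have : 1 ≤ pvMirror f := le_trans (Nat.one_le_pow _ _ (by norm_num)) hbnd.1
      exact_mod_cast this
    refine ⟨h1, hle, ?_⟩
    obtain ⟨mm, hmm⟩ : ∃ mm : Nat, x = ((mm + 1 : Nat) : Int) := ⟨(x - 1).toNat, by omega⟩
    rw [hmm] at heq ⊢
    exact (pvTest_digits mm).2
      ((pvPal_iff_mirror mm).2 ⟨h, f, hh, hlo, hhi, by exact_mod_cast heq⟩)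

-- ===== VERDICT (by name: the statement is the Claim_ definition above) =====
theorem create_even_number_method_spec : Claim_equal_create_even_number_method := by
  intro number _
  unfold Spec_create_even_number_method
  have hA := pvA_pairwise number
  have hB := pvB_pairwise number
  refine PySem.List.eq_of_perm_of_pairwise_le_of_injective (fun x : Int => x)
    (fun a b h => h) ?_ (hA.imp le_of_lt) (hB.imp le_of_lt)
  refine (List.perm_ext_iff_of_nodup (hA.imp ?_) (hB.imp ?_)).2 (pvMem_iff number)
  · exact fun h => ne_of_lt h
  · exact fun h => ne_of_lt h
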